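-- pv_equiv track=rewrite | github.com/apanariello4/aoc | 2024/02.py | is_line_safe
-- ===== SOURCE A (Python) =====
-- def is_line_safe(nums):
--     is_decreasing = nums[0] > nums[1]
--     for num_1, num_2 in zip(nums, nums[1:]):
--         if abs(num_2 - num_1) > 3 or abs(num_2 - num_1) == 0:
--             return False
--         if is_decreasing != (num_1 > num_2):
--             return False
--     return True
-- ===== SOURCE B (Python) =====
-- def is_line_safe(nums):
--     is_decreasing = nums[0] > nums[1]
--     if sorted(nums, reverse=is_decreasing) != nums:
--         return False
--     if len(set(nums)) != len(nums):
--         return False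
--     return max(abs(b - a) for a, b in zip(nums, nums[1:])) <= 3
-- ===== Notes on version B (the rewrite author's own statement) =====
-- stated objective: alternative
-- what changed: Replaces A's single stateful early-returning pass (per-step direction and range checks) by three independent global checks: the list equals its own sort in the direction of the first pair, a set proves all elements distinct, and the maximum absolute adjacent gap is at most 3.
import Mathlib
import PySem

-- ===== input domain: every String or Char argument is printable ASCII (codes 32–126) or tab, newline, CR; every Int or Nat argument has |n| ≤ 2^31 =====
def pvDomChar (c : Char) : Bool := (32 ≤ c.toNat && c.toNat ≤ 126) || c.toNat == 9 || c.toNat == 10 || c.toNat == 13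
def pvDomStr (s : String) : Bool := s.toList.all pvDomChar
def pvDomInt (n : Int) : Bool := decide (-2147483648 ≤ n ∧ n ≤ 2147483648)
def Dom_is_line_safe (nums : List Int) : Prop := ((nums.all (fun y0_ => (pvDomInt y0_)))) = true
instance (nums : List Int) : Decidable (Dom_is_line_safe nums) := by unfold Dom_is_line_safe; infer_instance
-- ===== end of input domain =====

-- B replaces A's stateful early-returning pass by three independent global checks
-- (list equals its own directional sort, set-cardinality distinctness, max adjacent gap ≤ 3);
-- objective: alternative (same result by a different algorithm, not claimed faster).

-- ===== PORT A =====
-- the for-loop with early 'return False': structural recursion over the zipped pairs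
def isLineSafeLoopA (is_decreasing : Bool) : List (Int × Int) → Bool
  | [] => true
  | (num_1, num_2) :: rest =>
    if (num_2 - num_1).natAbs > 3 ∨ (num_2 - num_1).natAbs = 0 then false
    else if is_decreasing ≠ decide (num_1 > num_2) then false
    else isLineSafeLoopA is_decreasing rest

def is_line_safe (nums : List Int) : Bool :=
  match PySem.List.pyGet? nums 0, PySem.List.pyGet? nums 1 with
  | some n0, some n1 =>
    let is_decreasing := decide (n0 > n1)
    isLineSafeLoopA is_decreasing (nums.zip (PySem.List.slice nums (some 1) none))
  | _, _ => false  -- IndexError in Python (len < 2); excluded by Pre_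

-- ===== PORT B =====
def is_line_safe_alt (nums : List Int) : Bool :=
  match nums with
  | n0 :: n1 :: _ =>
    let is_decreasing := decide (n0 > n1)
    if PySem.List.sorted nums (fun x => x) is_decreasing ≠ nums then false
    else if (PySem.Set.ofList nums).length ≠ nums.length then false
    else
      match PySem.List.max? ((nums.zip (PySem.List.slice nums (some 1) none)).map
          (fun p => |p.2 - p.1|)) (fun x => x) with
      | some m => decide (m ≤ 3)
      | none => false  -- unreachable: the list of gaps is nonempty (len ≥ 2)
  | _ => false  -- IndexError in Python (len < 2); excluded by Pre_

-- ===== PRECONDITION & SPEC =====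
-- Pre_ excludes exactly the lists of length < 2, on which both Pythons raise IndexError.
def Pre_is_line_safe (nums : List Int) : Prop := 2 ≤ nums.length
instance (nums : List Int) : Decidable (Pre_is_line_safe nums) := by unfold Pre_is_line_safe; infer_instance
def pvWitness_is_line_safe : List Int := [1, 2, 3]

def Spec_is_line_safe (nums : List Int) (out : Bool) : Prop := out = is_line_safe_alt nums
instance (nums : List Int) (out : Bool) : Decidable (Spec_is_line_safe nums out) := by unfold Spec_is_line_safe; infer_instance

-- ===== CLAIM (what is proved, stated in full; the proofs are below) =====
def Claim_equal_is_line_safe : Prop := ∀ (nums : List Int), Dom_is_line_safe nums → Pre_is_line_safe nums → Spec_is_line_safe nums (is_line_safe nums)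

-- ===== LEMMAS AND PROOFS =====
-- A's loop is the 'all' of the direction-normalized step condition over the zipped pairs
lemma loopA_eq_all (dec : Bool) (ps : List (Int × Int)) :
    isLineSafeLoopA dec ps
      = ps.all (fun p =>
          decide (1 ≤ (if dec then p.1 - p.2 else p.2 - p.1) ∧
                  (if dec then p.1 - p.2 else p.2 - p.1) ≤ 3)) := by
  induction ps with
  | nil => rfl
  | cons p rest ih =>
    obtain ⟨n1, n2⟩ := p
    simp only [isLineSafeLoopA, List.all_cons, ih]
    by_cases h1 : (n2 - n1).natAbs > 3 ∨ (n2 - n1).natAbs = 0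
    · rw [if_pos h1]
      have : (decide (1 ≤ (if dec then n1 - n2 else n2 - n1) ∧ (if dec then n1 - n2 else n2 - n1) ≤ 3)) = false := by
        cases dec <;> simp <;> omega
      simp [this]
    · rw [if_neg h1]
      by_cases h2 : dec ≠ decide (n1 > n2)
      · rw [if_pos h2]
        have : (decide (1 ≤ (if dec then n1 - n2 else n2 - n1) ∧ (if dec then n1 - n2 else n2 - n1) ≤ 3)) = false := by
          cases dec <;> simp_all <;> omega
        simp [this]
      · rw [if_neg h2]
        have : (decide (1 ≤ (if dec then n1 - n2 else n2 - n1) ∧ (if dec then n1 - n2 else n2 - n1) ≤ 3)) = true := by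
          cases dec <;> simp_all <;> omega
        simp [this]

-- ∀ over adjacent (zip-with-tail) pairs is IsChain
lemma zip_tail_forall_iff_isChain (R : Int → Int → Prop) :
    ∀ l : List Int, (∀ p ∈ l.zip l.tail, R p.1 p.2) ↔ List.IsChain R l
  | [] => by simp
  | [_] => by simp
  | a :: b :: t => by
    have ih := zip_tail_forall_iff_isChain R (b :: t)
    simp only [List.tail_cons, List.zip_cons_cons, List.mem_cons, List.isChain_cons_cons] at *
    constructor
    · intro h
      exact ⟨h (a, b) (Or.inl rfl), ih.mp (fun p hp => h p (Or.inr hp))⟩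
    · rintro ⟨hab, hc⟩ p hp
      rcases hp with rfl | hp
      · exact hab
      · exact (ih.mpr hc) p hp

-- foldl over Set.add only ever extends by a subsequence of the fed elements
lemma foldl_add_sublist (xs : List Int) : ∀ (acc pre : List Int), acc.Sublist pre →
    (xs.foldl PySem.Set.add acc).Sublist (pre ++ xs) := by
  induction xs with
  | nil => intro acc pre h; simpa using h
  | cons x t ih =>
    intro acc pre h
    have hstep : (PySem.Set.add acc x).Sublist (pre ++ [x]) := by
      by_cases hc : PySem.Set.contains acc x = true
      · simp only [PySem.Set.add, hc, if_pos]
        exact h.trans (List.sublist_append_left pre [x])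
      · simp only [PySem.Set.add, hc, if_neg, Bool.false_eq_true, not_false_iff]
        exact h.append (List.Sublist.refl [x])
    have := ih (PySem.Set.add acc x) (pre ++ [x]) hstep
    simpa [List.append_assoc] using this

-- set(xs) has as many elements as xs exactly when xs has no duplicates
lemma set_len_iff_nodup (l : List Int) :
    (PySem.Set.ofList l).length = l.length ↔ l.Nodup := by
  constructor
  · intro h
    have hs : (PySem.Set.ofList l).Sublist l := by
      have := foldl_add_sublist l [] [] (List.Sublist.refl [])
      simpa [PySem.Set.ofList_eq_foldl] using this
    have := hs.eq_of_length h
    rw [← this]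
    exact PySem.Set.nodup_ofList l
  · intro h
    rw [PySem.Set.ofList_eq_self_of_nodup l h]

-- sorted(xs, reverse=rev) == xs names the lists ordered in that direction
lemma sorted_eq_iff_pairwise_le (l : List Int) :
    PySem.List.sorted l (fun x => x) = l ↔ l.Pairwise (· ≤ ·) := by
  constructor
  · intro h
    have := PySem.List.sorted_pairwise l (fun x => x)
    rwa [h] at this
  · exact PySem.List.sorted_eq_self_of_pairwise l (fun x => x)

lemma sorted_rev_eq_iff_pairwise_ge (l : List Int) :
    PySem.List.sorted l (fun x => x) true = l ↔ l.Pairwise (· ≥ ·) := by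
  constructor
  · intro h
    have := PySem.List.sorted_pairwise_rev l (fun x => x)
    rwa [h] at this
  · exact PySem.List.sorted_rev_eq_self_of_pairwise l (fun x => x)

-- what B's three checks say, as one proposition
lemma alt_eq_true_iff (n0 n1 : Int) (rest : List Int) :
    is_line_safe_alt (n0 :: n1 :: rest) = true ↔
      (PySem.List.sorted (n0 :: n1 :: rest) (fun x => x) (decide (n0 > n1)) = (n0 :: n1 :: rest)
       ∧ (n0 :: n1 :: rest).Nodup
       ∧ ∀ p ∈ (n0 :: n1 :: rest).zip (n1 :: rest), |p.2 - p.1| ≤ 3) := by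
  unfold is_line_safe_alt
  simp only [PySem.List.slice_from_one, List.tail_cons]
  split_ifs with h1 h2
  · simp [h1]
  · simp only [false_iff]
    rintro ⟨-, hnd, -⟩
    exact h2 ((set_len_iff_nodup _).mpr hnd)
  · rw [not_not] at h1 h2
    have hnd := (set_len_iff_nodup _).mp h2
    cases hm : PySem.List.max?
        (((n0 :: n1 :: rest).zip (n1 :: rest)).map (fun p => |p.2 - p.1|)) (fun x => x) with
    | none =>
      rw [PySem.List.max?_eq_none_iff] at hm
      simp [List.zip_cons_cons] at hm
    | some m =>
      simp only [h1, hnd, true_and, decide_eq_true_eq]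
      constructor
      · intro hm3 p hp
        exact le_trans (PySem.List.max?_isMax hm _ (List.mem_map_of_mem hp)) hm3
      · intro hall
        obtain ⟨p, hp, hpe⟩ := List.mem_map.mp (PySem.List.max?_mem hm)
        exact hpe ▸ hall p hp

-- the core equivalence, for a fixed direction and any list of length ≥ 2
lemma loop_eq_alt (n0 n1 : Int) (rest : List Int) :
    isLineSafeLoopA (decide (n0 > n1)) ((n0 :: n1 :: rest).zip (n1 :: rest))
      = is_line_safe_alt (n0 :: n1 :: rest) := by
  rw [Bool.eq_iff_iff, alt_eq_true_iff, loopA_eq_all, List.all_eq_true]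
  by_cases hd : n0 > n1
  · simp only [hd, decide_true, if_true, decide_eq_true_eq]
    constructor
    · intro h
      have hstrict : ∀ p ∈ (n0 :: n1 :: rest).zip (n1 :: rest), p.2 < p.1 := by
        intro p hp; have := h p hp; omega
      have hchain := (zip_tail_forall_iff_isChain (fun a b => b < a) (n0 :: n1 :: rest)).mp hstrict
      have hpw : (n0 :: n1 :: rest).Pairwise (fun a b => b < a) :=
        (@List.isChain_iff_pairwise _ (fun a b : Int => b < a) _ ⟨fun h1 h2 => lt_trans h2 h1⟩).mp hchain
      have hsplit := List.sortedGT_iff_nodup_and_sortedGE.mp (List.Pairwise.sortedGT hpw)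
      refine ⟨(sorted_rev_eq_iff_pairwise_ge _).mpr (List.SortedGE.pairwise hsplit.2),
              hsplit.1, ?_⟩
      intro p hp
      have := h p hp
      rw [abs_le]; omega
    · rintro ⟨hsort, hnd, hgap⟩
      have hge := (sorted_rev_eq_iff_pairwise_ge _).mp hsort
      have hgt : (n0 :: n1 :: rest).Pairwise (fun a b => b < a) :=
        List.SortedGT.pairwise
          (List.sortedGT_iff_nodup_and_sortedGE.mpr ⟨hnd, List.Pairwise.sortedGE hge⟩)
      have hchain :=
        (@List.isChain_iff_pairwise _ (fun a b : Int => b < a) _ ⟨fun h1 h2 => lt_trans h2 h1⟩).mpr hgt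
      have hstrict := (zip_tail_forall_iff_isChain (fun a b => b < a) (n0 :: n1 :: rest)).mpr hchain
      intro p hp
      have h1 := hstrict p hp
      have h2 := abs_le.mp (hgap p hp)
      omega
  · have hdec : decide (n0 > n1) = false := by simp [hd]
    simp only [hdec, Bool.false_eq_true, if_false, decide_eq_true_eq]
    constructor
    · intro h
      have hstrict : ∀ p ∈ (n0 :: n1 :: rest).zip (n1 :: rest), p.1 < p.2 := by
        intro p hp; have := h p hp; omega
      have hchain := (zip_tail_forall_iff_isChain (fun a b => a < b) (n0 :: n1 :: rest)).mp hstrict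
      have hpw : (n0 :: n1 :: rest).Pairwise (fun a b => a < b) :=
        (@List.isChain_iff_pairwise _ (fun a b : Int => a < b) _ ⟨fun h1 h2 => lt_trans h1 h2⟩).mp hchain
      have hsplit := List.sortedLT_iff_nodup_and_sortedLE.mp (List.Pairwise.sortedLT hpw)
      refine ⟨(sorted_eq_iff_pairwise_le _).mpr (List.SortedLE.pairwise hsplit.2),
              hsplit.1, ?_⟩
      intro p hp
      have := h p hp
      rw [abs_le]; omega
    · rintro ⟨hsort, hnd, hgap⟩
      have hle := (sorted_eq_iff_pairwise_le _).mp hsort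
      have hlt : (n0 :: n1 :: rest).Pairwise (fun a b => a < b) :=
        List.SortedLT.pairwise
          (List.sortedLT_iff_nodup_and_sortedLE.mpr ⟨hnd, List.Pairwise.sortedLE hle⟩)
      have hchain :=
        (@List.isChain_iff_pairwise _ (fun a b : Int => a < b) _ ⟨fun h1 h2 => lt_trans h1 h2⟩).mpr hlt
      have hstrict := (zip_tail_forall_iff_isChain (fun a b => a < b) (n0 :: n1 :: rest)).mpr hchain
      intro p hp
      have h1 := hstrict p hp
      have h2 := abs_le.mp (hgap p hp)
      omega

-- ===== VERDICT (by name: the statement is the Claim_ definition above) =====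
theorem is_line_safe_spec : Claim_equal_is_line_safe := by
  intro nums _ hpre
  unfold Spec_is_line_safe
  match nums, hpre with
  | n0 :: n1 :: rest, _ =>
    have h : (0:Int) ≤ (rest.length : Int) + 1 := by positivity
    have hA : is_line_safe (n0 :: n1 :: rest)
        = isLineSafeLoopA (decide (n0 > n1)) ((n0 :: n1 :: rest).zip (n1 :: rest)) := by
      simp [is_line_safe, PySem.List.pyGet?, PySem.List.pyIdx?, PySem.List.slice_from_one, h]
    rw [hA, loop_eq_alt]
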